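-- pv_equiv track=rewrite | github.com/Arnarsson/Jarvis | server/src/jarvis_server/workflow/detector.py | _find_common_words
-- ===== SOURCE A (Python) =====
-- def _find_common_words(texts: list[str]) -> set[str]:
--     """Find words that appear in all texts."""
--     if not texts:
--         return set()
--
--     word_sets = [set(t.lower().split()) for t in texts if t]
--     if not word_sets:
--         return set()
--
--     common = word_sets[0]
--     for ws in word_sets[1:]:
--         common = common & ws
--
--     # Filter out short/common words
--     common = {w for w in common if len(w) > 3}
--     return common
-- ===== SOURCE B (Python) =====
-- def _find_common_words(texts: list[str]) -> set[str]:
--     """Find words that appear in all texts."""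
--     docs = [t for t in texts if t]
--     if not docs:
--         return set()
--     n = len(docs)
--     counts = {}
--     for t in docs:
--         for w in set(t.lower().split()):
--             counts[w] = counts.get(w, 0) + 1
--     return {w for w, c in counts.items() if c == n and len(w) > 3}
-- ===== Notes on version B (the rewrite author's own statement) =====
-- stated objective: alternative
-- what changed: B replaces A's progressive pairwise set intersections by a document-frequency counter: one dict counts in how many non-empty texts each distinct word occurs, and a single filtering pass keeps the words whose count equals the number of non-empty texts and whose length exceeds 3.
import Mathlib
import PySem

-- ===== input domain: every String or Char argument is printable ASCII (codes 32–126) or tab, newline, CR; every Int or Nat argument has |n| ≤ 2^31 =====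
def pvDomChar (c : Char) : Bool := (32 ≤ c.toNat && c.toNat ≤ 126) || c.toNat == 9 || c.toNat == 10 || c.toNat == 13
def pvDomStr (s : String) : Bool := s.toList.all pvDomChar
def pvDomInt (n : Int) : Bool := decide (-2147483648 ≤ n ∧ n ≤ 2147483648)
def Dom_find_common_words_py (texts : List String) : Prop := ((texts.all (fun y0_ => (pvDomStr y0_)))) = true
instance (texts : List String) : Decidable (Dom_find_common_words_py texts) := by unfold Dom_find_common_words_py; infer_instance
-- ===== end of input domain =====

-- B replaces A's progressive pairwise set intersections by a document-frequency counter
-- (a dict counting in how many non-empty texts each distinct word occurs) plus one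
-- filtering pass keeping words with count = number of non-empty texts and length > 3
-- (objective: alternative algorithm/data structure).

-- ===== PORT A =====
-- literal port of A: per-text word sets, progressive intersection, then length filter
def find_common_words_py (texts : List String) : List String :=
  if texts = [] then []
  else
    let word_sets : List (PySem.Set String) :=
      (texts.filter (fun t => t ≠ "")).map
        (fun t => PySem.Set.ofList (PySem.Str.split₀ (PySem.Str.lower t)))
    if word_sets = [] then []
    else
      let common := word_sets.tail.foldl PySem.Set.inter (word_sets.headD [])
      PySem.Set.ofList (common.filter (fun w => decide (3 < PySem.Str.len w)))

-- ===== PORT B =====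
-- literal port of B: count per-document distinct-word occurrences into a dict,
-- then keep the words whose count equals the number of non-empty texts and len > 3
def find_common_words_py_alt (texts : List String) : List String :=
  let docs := texts.filter (fun t => t ≠ "")
  if docs = [] then []
  else
    let n : Int := docs.length
    let counts : PySem.Dict String Int :=
      docs.foldl (fun d t =>
        (PySem.Set.ofList (PySem.Str.split₀ (PySem.Str.lower t))).foldl
          (fun d w => d.insert w (d.getD w 0 + 1)) d) PySem.Dict.empty
    PySem.Set.ofList
      ((counts.items.filter (fun p => p.2 == n && decide (3 < PySem.Str.len p.1))).map Prod.fst)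

-- ===== PRECONDITION & SPEC =====
def Spec_find_common_words_py (texts : List String) (out : List String) : Prop := out = find_common_words_py_alt texts
instance (texts : List String) (out : List String) : Decidable (Spec_find_common_words_py texts out) := by unfold Spec_find_common_words_py; infer_instance

-- ===== CLAIM (what is proved, stated in full; the proofs are below) =====
def Claim_equal_find_common_words_py : Prop := ∀ (texts : List String), Dom_find_common_words_py texts → Spec_find_common_words_py texts (find_common_words_py texts)

-- ===== LEMMAS AND PROOFS =====

-- folding ∩ over a list of sets is one filter by membership in all of them
theorem interFold {α : Type} [BEq α] (ts : List (PySem.Set α)) (s : PySem.Set α) :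
    ts.foldl PySem.Set.inter s = s.filter (fun w => ts.all (fun t => t.contains w)) := by
  induction ts generalizing s with
  | nil => simp
  | cons t ts ih =>
    simp only [List.foldl_cons, ih, PySem.Set.inter, List.filter_filter, List.all_cons]
    congr 1
    funext w
    rw [Bool.and_comm]

-- adding further elements to a set does not change its filtration by a predicate
-- that only holds on the set's current members
theorem filter_update (s ys : List String) (p : String → Bool)
    (h : ∀ w, p w = true → w ∈ s) :
    (PySem.Set.update s ys).filter p = s.filter p := by
  induction ys generalizing s with
  | nil => simp [PySem.Set.update_nil]
  | cons y ys ih =>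
    rw [PySem.Set.update_cons]
    by_cases hy : y ∈ s
    · rw [PySem.Set.add_of_mem hy]; exact ih s h
    · rw [PySem.Set.add_of_not_mem hy,
        ih (s ++ [y]) (fun w hw => List.mem_append_left _ (h w hw)),
        List.filter_append]
      have hpy : p y = false := by
        cases hpy : p y with
        | true => exact absurd (h y hpy) hy
        | false => rfl
      simp [hpy]

-- count in a flatten of duplicate-free lists = number of lists containing the element
theorem count_flatten_nodup (L : List (List String)) (w : String)
    (h : ∀ s ∈ L, s.Nodup) :
    L.flatten.count w = L.countP (fun s => decide (w ∈ s)) := by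
  induction L with
  | nil => simp
  | cons s L ih =>
    simp only [List.flatten_cons, List.count_append, List.countP_cons,
      ih (fun t ht => h t (List.mem_cons_of_mem _ ht))]
    by_cases hw : w ∈ s
    · rw [List.count_eq_one_of_mem (h s List.mem_cons_self) hw]; simp [hw]; omega
    · rw [List.count_eq_zero_of_not_mem hw]; simp [hw]

-- normal form of B's filtering pass over the counter's items:
-- it is one filter over the first text's word set
theorem B_norm (S0 : PySem.Set String) (Ls : List (PySem.Set String))
    (hS0 : S0.Nodup) (hLs : ∀ s ∈ Ls, s.Nodup) (q : String → Bool) (n : Int)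
    (hn : n = ((Ls.length + 1 : Nat) : Int)) :
    ((((PySem.Set.ofList (S0 ++ Ls.flatten)).map
          (fun k => (k, ((S0 ++ Ls.flatten).count k : Int)))).filter
        (fun p => p.2 == n && q p.1)).map Prod.fst)
      = S0.filter (fun w => q w && Ls.all (fun t => t.contains w)) := by
  subst hn
  rw [List.filter_map, List.map_map]
  have hid : (Prod.fst ∘ fun k : String => (k, (((S0 ++ Ls.flatten).count k : Nat) : Int))) = id := rfl
  rw [hid, List.map_id]
  have hmem : ∀ w, ((fun p : String × Int => p.2 == ((Ls.length + 1 : Nat) : Int) && q p.1) ∘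
      (fun k : String => (k, ((S0 ++ Ls.flatten).count k : Int)))) w = true → w ∈ S0 := by
    intro w hw
    simp only [Function.comp_apply, Bool.and_eq_true, beq_iff_eq, Nat.cast_inj] at hw
    have hcnt : (S0 ++ Ls.flatten).count w = Ls.length + 1 := by exact_mod_cast hw.1
    rw [List.count_append] at hcnt
    have h2 : Ls.flatten.count w = Ls.countP (fun s => decide (w ∈ s)) :=
      count_flatten_nodup Ls w hLs
    have hle : Ls.countP (fun s => decide (w ∈ s)) ≤ Ls.length := List.countP_le_length
    exact List.count_pos_iff.mp (by omega)
  rw [PySem.Set.ofList_append, PySem.Set.ofList_eq_self_of_nodup S0 hS0,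
    filter_update S0 Ls.flatten _ hmem]
  apply List.filter_congr
  intro w hw
  have h1 : S0.count w = 1 := List.count_eq_one_of_mem hS0 hw
  have h2 : Ls.flatten.count w = Ls.countP (fun s => decide (w ∈ s)) :=
    count_flatten_nodup Ls w hLs
  rw [Bool.eq_iff_iff]
  simp only [Function.comp_apply, Bool.and_eq_true, beq_iff_eq, List.all_eq_true,
    PySem.Set.contains_eq_listContains, List.contains_eq_mem, decide_eq_true_eq,
    List.count_append, h1, h2]
  constructor
  · rintro ⟨hc, hq⟩
    have hc' : 1 + Ls.countP (fun s => decide (w ∈ s)) = Ls.length + 1 := by exact_mod_cast hc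
    have hcp : Ls.countP (fun s => decide (w ∈ s)) = Ls.length := by omega
    refine ⟨hq, fun s hs => ?_⟩
    simpa using List.countP_eq_length.mp hcp s hs
  · rintro ⟨hq, hall⟩
    have hcp : Ls.countP (fun s => decide (w ∈ s)) = Ls.length :=
      List.countP_eq_length.mpr (fun s hs => by simpa using hall s hs)
    refine ⟨?_, hq⟩
    rw [hcp]
    push_cast
    ring

-- abbreviation used only in the proofs below: a text's set of lowercase words
def wordsOf (t : String) : PySem.Set String :=
  PySem.Set.ofList (PySem.Str.split₀ (PySem.Str.lower t))

theorem main_eq (texts : List String) :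
    find_common_words_py texts = find_common_words_py_alt texts := by
  unfold find_common_words_py find_common_words_py_alt
  have hwof : (fun t => PySem.Set.ofList (PySem.Str.split₀ (PySem.Str.lower t))) = wordsOf := rfl
  rw [hwof]
  by_cases h0 : texts = []
  · simp [h0]
  · rw [if_neg h0]
    by_cases hd : texts.filter (fun t => t ≠ "") = []
    · rw [hd]; simp
    · rcases List.exists_cons_of_ne_nil hd with ⟨d, ds, hds⟩
      rw [hds]
      rw [if_neg (by simp), if_neg (by simp)]
      simp only [List.map_cons, List.tail_cons, List.headD_cons]
      -- A side: one filter over the first text's word set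
      rw [interFold, List.filter_filter]
      -- B side: the nested loop is the counter of the flattened word sets
      have hloop : (fun (acc : PySem.Dict String Int) (t : String) =>
          List.foldl (fun d w => d.insert w (d.getD w 0 + 1)) acc
            (PySem.Set.ofList (PySem.Str.split₀ (PySem.Str.lower t))))
          = (fun acc t => List.foldl (fun d w => d.insert w (d.getD w 0 + 1)) acc (wordsOf t)) := rfl
      rw [hloop]
      have hfold : (List.foldl (fun (acc : PySem.Dict String Int) t =>
            List.foldl (fun d w => d.insert w (d.getD w 0 + 1)) acc (wordsOf t))
            PySem.Dict.empty (d :: ds))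
          = PySem.Dict.counter ((d :: ds).map wordsOf).flatten := by
        rw [← PySem.Dict.foldl_insert_getD_add_one_eq_counter, List.foldl_flatten, List.foldl_map]
      rw [hfold, PySem.Dict.items_counter]
      exact (congrArg PySem.Set.ofList
        (B_norm (wordsOf d) (ds.map wordsOf) (PySem.Set.nodup_ofList _)
          (fun s hs => by
            rcases List.mem_map.mp hs with ⟨t, _, rfl⟩
            exact PySem.Set.nodup_ofList _)
          (fun w => decide (3 < PySem.Str.len w)) _ (by simp))).symm

-- ===== VERDICT (by name: the statement is the Claim_ definition above) =====
theorem find_common_words_py_spec : Claim_equal_find_common_words_py := by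
  intro texts _
  exact main_eq texts
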